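-- pv_equiv track=rewrite | github.com/Mingye-Lu/VC-IPO-Extractor | extract_vc_from_pdf.py | flag_role
-- ===== SOURCE A (Python) =====
-- from typing import List, Tuple, Optional
--
-- def flag_role(text: str, vc_name: str, keywords: List[str]) -> str:
--     if not vc_name:
--         return "0"
--     lines = text.splitlines()
--     for idx, line in enumerate(lines):
--         if vc_name in line and any(k in line for k in keywords):
--             return "1"
--         if vc_name in line:
--             if idx > 0 and any(k in lines[idx - 1] for k in keywords):
--                 return "1"
--             if idx + 1 < len(lines) and any(k in lines[idx + 1] for k in keywords):
--                 return "1"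
--     return "0"
-- ===== SOURCE B (Python) =====
-- from typing import List
--
--
-- def flag_role(text: str, vc_name: str, keywords: List[str]) -> str:
--     # Different algorithm: extract the sorted index lists of vc-lines and of
--     # keyword-lines, then a two-pointer merge decides whether the minimal gap
--     # between the two index sets is <= 1 (same line or adjacent lines).
--     if not vc_name:
--         return "0"
--     lines = text.splitlines()
--     vc_idx = [i for i, ln in enumerate(lines) if vc_name in ln]
--     kw_idx = [i for i, ln in enumerate(lines) if any(k in ln for k in keywords)]
--     i = j = 0
--     while i < len(vc_idx) and j < len(kw_idx):
--         d = vc_idx[i] - kw_idx[j]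
--         if abs(d) <= 1:
--             return "1"
--         if d > 0:
--             j += 1
--         else:
--             i += 1
--     return "0"
-- ===== Notes on version B (the rewrite author's own statement) =====
-- stated objective: alternative
-- what changed: B reduces the problem to set geometry: it extracts the sorted index lists of vc-lines and keyword-lines and runs a two-pointer merge to decide whether the minimal index gap is <= 1, instead of A's scan over lines with per-hit neighbour keyword rescans (each line's keyword test is done once).
import Mathlib
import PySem

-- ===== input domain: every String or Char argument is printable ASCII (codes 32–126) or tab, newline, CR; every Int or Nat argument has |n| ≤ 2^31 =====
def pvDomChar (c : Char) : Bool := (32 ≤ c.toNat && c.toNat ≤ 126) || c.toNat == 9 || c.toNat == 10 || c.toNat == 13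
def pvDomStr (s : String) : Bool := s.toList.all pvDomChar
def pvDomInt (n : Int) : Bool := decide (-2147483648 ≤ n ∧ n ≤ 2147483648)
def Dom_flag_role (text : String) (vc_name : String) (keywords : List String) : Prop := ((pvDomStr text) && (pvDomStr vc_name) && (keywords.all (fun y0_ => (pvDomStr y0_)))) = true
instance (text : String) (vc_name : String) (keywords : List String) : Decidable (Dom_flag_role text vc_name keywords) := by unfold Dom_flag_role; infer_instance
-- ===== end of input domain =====

-- B replaces A's line scan with neighbour re-checks by a different algorithm: it extracts
-- the sorted index lists of vc-lines and keyword-lines and decides by a two-pointer merge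
-- whether the minimal index gap is ≤ 1; alternative decomposition, same results.

-- ===== PORT A =====
-- any(k in line for k in keywords)
def aAnyKw (keywords : List String) (line : String) : Bool :=
  keywords.any (fun k => PySem.Str.isIn k line)

-- A's for-loop over enumerate(lines); `lines` stays in scope for the neighbour lookups
-- (the pyGetD defaults are never consulted: the idx guards keep the index in range).
def aLoop (lines : List String) (vc_name : String) (keywords : List String) :
    List (Int × String) → String
  | [] => "0"
  | (idx, line) :: rest =>
    if PySem.Str.isIn vc_name line && aAnyKw keywords line then "1"
    else if PySem.Str.isIn vc_name line &&
         ((decide (0 < idx) && aAnyKw keywords (PySem.List.pyGetD lines (idx - 1) "")) ||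
          (decide (idx + 1 < (lines.length : Int)) &&
            aAnyKw keywords (PySem.List.pyGetD lines (idx + 1) ""))) then "1"
    else aLoop lines vc_name keywords rest

def flag_role (text : String) (vc_name : String) (keywords : List String) : String :=
  if vc_name = "" then "0"
  else
    let lines := PySem.Str.splitlines text
    aLoop lines vc_name keywords (PySem.List.enumerate lines)

-- ===== PORT B =====
-- [i for i, ln in enumerate(lines) if p(ln)]
def bIdx (lines : List String) (p : String → Bool) : List Int :=
  ((PySem.List.enumerate lines).filter (fun q => p q.2)).map (fun q => q.1)

-- B's while-loop: two-pointer merge of the two sorted index lists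
def bTP : List Int → List Int → String
  | [], _ => "0"
  | _ :: _, [] => "0"
  | v :: vs, k :: ks =>
    if (v - k).natAbs ≤ 1 then "1"
    else if v - k > 0 then bTP (v :: vs) ks
    else bTP vs (k :: ks)
termination_by vs ks => vs.length + ks.length

def flag_role_alt (text : String) (vc_name : String) (keywords : List String) : String :=
  if vc_name = "" then "0"
  else
    let lines := PySem.Str.splitlines text
    let vcIdx := bIdx lines (fun ln => PySem.Str.isIn vc_name ln)
    let kwIdx := bIdx lines (fun ln => keywords.any (fun k => PySem.Str.isIn k ln))
    bTP vcIdx kwIdx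

-- ===== PRECONDITION & SPEC =====
def Spec_flag_role (text : String) (vc_name : String) (keywords : List String) (out : String) : Prop := out = flag_role_alt text vc_name keywords
instance (text : String) (vc_name : String) (keywords : List String) (out : String) : Decidable (Spec_flag_role text vc_name keywords out) := by unfold Spec_flag_role; infer_instance

-- ===== CLAIM (what is proved, stated in full; the proofs are below) =====
def Claim_equal_flag_role : Prop := ∀ (text : String) (vc_name : String) (keywords : List String), Dom_flag_role text vc_name keywords → Spec_flag_role text vc_name keywords (flag_role text vc_name keywords)

-- ===== LEMMAS AND PROOFS =====

theorem any_congr_mem {α : Type} (l : List α) (p q : α → Bool)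
    (h : ∀ x ∈ l, p x = q x) : l.any p = l.any q := by
  induction l with
  | nil => rfl
  | cons x xs ih =>
    simp only [List.any_cons, h x (by simp), ih (fun y hy => h y (by simp [hy]))]

-- A's early-return loop is the `any` of its combined per-item condition.
theorem aLoop_eq_any (lines : List String) (vc : String) (kws : List String)
    (ps : List (Int × String)) :
    aLoop lines vc kws ps =
      (if ps.any (fun p =>
          PySem.Str.isIn vc p.2 &&
          (aAnyKw kws p.2 ||
           (decide (0 < p.1) && aAnyKw kws (PySem.List.pyGetD lines (p.1 - 1) "")) ||
           (decide (p.1 + 1 < (lines.length : Int)) &&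
             aAnyKw kws (PySem.List.pyGetD lines (p.1 + 1) "")))) = true
       then "1" else "0") := by
  induction ps with
  | nil => simp [aLoop]
  | cons p rest ih =>
    obtain ⟨idx, line⟩ := p
    simp only [aLoop, ih, List.any_cons]
    simp only [show ∀ x a g1 g2 : Bool, (x && (a || g1 || g2)) = ((x && a) || (x && (g1 || g2)))
          from by decide]
    cases h1 : (PySem.Str.isIn vc line && aAnyKw kws line) <;>
      cases h2 : (PySem.Str.isIn vc line &&
        ((decide (0 < idx) && aAnyKw kws (PySem.List.pyGetD lines (idx - 1) "")) ||
         (decide (idx + 1 < (lines.length : Int)) &&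
           aAnyKw kws (PySem.List.pyGetD lines (idx + 1) "")))) <;>
      simp only [Bool.false_or, Bool.true_or, Bool.or_self] <;> rfl

-- membership in B's index lists
theorem mem_bIdx (lines : List String) (p : String → Bool) (x : Int) :
    x ∈ bIdx lines p ↔ ∃ (k : Nat) (h : k < lines.length), x = (k : Int) ∧ p lines[k] = true := by
  unfold bIdx
  simp only [List.mem_map, List.mem_filter]
  constructor
  · rintro ⟨q, ⟨hq, hp⟩, rfl⟩
    rw [PySem.List.mem_enumerate_iff] at hq
    obtain ⟨k, hk, rfl⟩ := hq
    exact ⟨k, hk, by simp, by simpa using hp⟩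
  · rintro ⟨k, hk, rfl, hp⟩
    exact ⟨((k : Int), lines[k]),
      ⟨(PySem.List.mem_enumerate_iff _ _ _).2 ⟨k, hk, by simp⟩, by simpa using hp⟩, rfl⟩

-- B's index lists are nondecreasing
theorem bIdx_pairwise (lines : List String) (p : String → Bool) :
    (bIdx lines p).Pairwise (· ≤ ·) := by
  unfold bIdx
  refine List.Pairwise.map _ (fun a b h => le_of_lt h) ?_
  exact ((PySem.List.pairwise_lt_enumerate lines 0).filter _)

-- the two-pointer merge decides whether some pair of indices is at distance ≤ 1
theorem bTP_eq (vs ks : List Int) (hv : vs.Pairwise (· ≤ ·)) (hk : ks.Pairwise (· ≤ ·)) :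
    bTP vs ks =
      (if (vs.any fun v => ks.any fun k => decide ((v - k).natAbs ≤ 1)) = true
       then "1" else "0") := by
  induction vs, ks using bTP.induct with
  | case1 ks => simp [bTP]
  | case2 v vs => simp [bTP]
  | case3 v vs k ks h =>
    rw [bTP]
    simp [h]
  | case4 v vs k ks h1 h2 ih =>
    rw [bTP]
    simp only [h1, if_false, h2, if_true, ih hv hk.tail]
    congr 1
    rw [any_congr_mem _ _ (fun v' => (k :: ks).any fun k' => decide ((v' - k').natAbs ≤ 1))]
    intro v' hv'
    have hle : v ≤ v' := by
      rcases hv' with _ | hv'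
      · rfl
      · exact List.rel_of_pairwise_cons hv (by assumption)
    have : ¬ (v' - k).natAbs ≤ 1 := by omega
    simp [List.any_cons, this]
  | case5 v vs k ks h1 h2 ih =>
    rw [bTP]
    simp only [h1, if_false, h2, if_false, ih hv.tail hk]
    congr 1
    have hnone : (ks.any fun k' => decide ((v - k').natAbs ≤ 1)) = false := by
      rw [List.any_eq_false]
      intro k' hk'
      have hle : k ≤ k' := List.rel_of_pairwise_cons hk hk'
      simp; omega
    have hnone' : ((k :: ks).any fun k' => decide ((v - k').natAbs ≤ 1)) = false := by
      rw [List.any_cons, hnone]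
      simp; omega
    rw [List.any_cons, hnone']
    simp

-- shared characterisation: some vc-line index i and keyword-line index j with |i-j| ≤ 1
def Near (lines : List String) (vc : String) (kws : List String) : Prop :=
  ∃ (i j : Nat) (_ : i < lines.length) (_ : j < lines.length),
    PySem.Str.isIn vc lines[i] = true ∧ aAnyKw kws lines[j] = true ∧
    ((i : Int) - (j : Int)).natAbs ≤ 1

theorem pyGetD_nat (lines : List String) (j : Nat) (hj : j < lines.length) :
    PySem.List.pyGetD lines (j : Int) "" = lines[j] := by
  rw [PySem.List.pyGetD_eq_getElem _ _ (Int.natCast_nonneg j) (by exact_mod_cast hj)]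
  simp

-- A's combined any-condition holds iff Near
theorem a_any_iff (lines : List String) (vc : String) (kws : List String) :
    ((PySem.List.enumerate lines).any (fun p =>
        PySem.Str.isIn vc p.2 &&
        (aAnyKw kws p.2 ||
         (decide (0 < p.1) && aAnyKw kws (PySem.List.pyGetD lines (p.1 - 1) "")) ||
         (decide (p.1 + 1 < (lines.length : Int)) &&
           aAnyKw kws (PySem.List.pyGetD lines (p.1 + 1) ""))))) = true ↔
    Near lines vc kws := by
  rw [List.any_eq_true]
  constructor
  · rintro ⟨p, hp, hcond⟩
    rw [PySem.List.mem_enumerate_iff] at hp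
    obtain ⟨i, hi, rfl⟩ := hp
    simp only [zero_add, Bool.and_eq_true, Bool.or_eq_true, decide_eq_true_eq] at hcond
    obtain ⟨hvc, hcase⟩ := hcond
    rcases hcase with (hkw | ⟨hpos, hkw⟩) | ⟨hlt, hkw⟩
    · exact ⟨i, i, hi, hi, hvc, hkw, by omega⟩
    · have hi0 : 0 < i := by exact_mod_cast hpos
      have hj : i - 1 < lines.length := by omega
      rw [show ((i : Int) - 1) = ((i - 1 : Nat) : Int) by omega, pyGetD_nat _ _ hj] at hkw
      exact ⟨i, i - 1, hi, hj, hvc, hkw, by omega⟩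
    · have hj : i + 1 < lines.length := by exact_mod_cast hlt
      rw [show ((i : Int) + 1) = ((i + 1 : Nat) : Int) by omega, pyGetD_nat _ _ hj] at hkw
      exact ⟨i, i + 1, hi, hj, hvc, hkw, by omega⟩
  · rintro ⟨i, j, hi, hj, hvc, hkw, hnear⟩
    refine ⟨((i : Int), lines[i]), (PySem.List.mem_enumerate_iff _ _ _).2 ⟨i, hi, by simp⟩, ?_⟩
    simp only [Bool.and_eq_true, Bool.or_eq_true, decide_eq_true_eq]
    refine ⟨hvc, ?_⟩
    rcases (by omega : j = i ∨ (j + 1 = i ∧ 0 < i) ∨ j = i + 1) with rfl | ⟨hji, hi0⟩ | rfl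
    · exact Or.inl (Or.inl hkw)
    · refine Or.inl (Or.inr ⟨by exact_mod_cast hi0, ?_⟩)
      rw [show ((i : Int) - 1) = ((j : Nat) : Int) by omega, pyGetD_nat _ _ hj]
      exact hkw
    · refine Or.inr ⟨by exact_mod_cast hj, ?_⟩
      rw [show ((i : Int) + 1) = (((i + 1 : Nat)) : Int) by omega, pyGetD_nat _ _ hj]
      exact hkw

-- B's pair-existence condition holds iff Near
theorem b_any_iff (lines : List String) (vc : String) (kws : List String) :
    ((bIdx lines (fun ln => PySem.Str.isIn vc ln)).any fun v =>
       (bIdx lines (fun ln => kws.any (fun k => PySem.Str.isIn k ln))).any fun k =>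
          decide ((v - k).natAbs ≤ 1)) = true ↔ Near lines vc kws := by
  simp only [List.any_eq_true, decide_eq_true_eq]
  constructor
  · rintro ⟨v, hv, k, hk, hnear⟩
    rw [mem_bIdx] at hv hk
    obtain ⟨i, hi, rfl, hvc⟩ := hv
    obtain ⟨j, hj, rfl, hkw⟩ := hk
    exact ⟨i, j, hi, hj, hvc, hkw, hnear⟩
  · rintro ⟨i, j, hi, hj, hvc, hkw, hnear⟩
    exact ⟨(i : Int), (mem_bIdx _ _ _).2 ⟨i, hi, rfl, hvc⟩,
           (j : Int), (mem_bIdx _ _ _).2 ⟨j, hj, rfl, hkw⟩, hnear⟩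

-- ===== VERDICT (by name: the statement is the Claim_ definition above) =====
theorem flag_role_spec : Claim_equal_flag_role := by
  intro text vc kws _
  unfold Spec_flag_role flag_role flag_role_alt
  by_cases hvc : vc = ""
  · simp [hvc]
  · simp only [hvc, ite_false]
    rw [aLoop_eq_any, bTP_eq _ _ (bIdx_pairwise _ _) (bIdx_pairwise _ _)]
    congr 1
    rw [eq_iff_iff, a_any_iff, b_any_iff]
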